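-- pv_equiv track=rewrite | github.com/mozilla/REALISE-Performance | prediction_postprocessing_scripts/convert_results_to_alert_summaries_breakdown.py | merge_close_points
-- ===== SOURCE A (Python) =====
-- def merge_close_points(points, margin):
--     clusters = []
--     for p in sorted(points):
--         if not clusters or abs(p - clusters[-1][-1]) > margin:
--             clusters.append([p])
--         else:
--             clusters[-1].append(p)
--     return clusters
-- ===== SOURCE B (Python) =====
-- def merge_close_points(points, margin):
--     # Label-then-scatter: give every sorted point a cluster id by prefix-summing
--     # the big-gap indicators, then scatter points into preallocated buckets.
--     pts = sorted(points)
--     if not pts: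
--         return []
--     labels = [0]
--     for prev, cur in zip(pts, pts[1:]):
--         labels.append(labels[-1] + (1 if cur - prev > margin else 0))
--     out = [[] for _ in range(labels[-1] + 1)]
--     for p, lab in zip(pts, labels):
--         out[lab].append(p)
--     return out
-- ===== Notes on version B (the rewrite author's own statement) =====
-- stated objective: alternative
-- what changed: B assigns each sorted point a cluster id by prefix-summing big-gap indicators in one pass, then scatters the points into preallocated buckets indexed by id, instead of A's single pass that conditionally appends to the last cluster.
import Mathlib
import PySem

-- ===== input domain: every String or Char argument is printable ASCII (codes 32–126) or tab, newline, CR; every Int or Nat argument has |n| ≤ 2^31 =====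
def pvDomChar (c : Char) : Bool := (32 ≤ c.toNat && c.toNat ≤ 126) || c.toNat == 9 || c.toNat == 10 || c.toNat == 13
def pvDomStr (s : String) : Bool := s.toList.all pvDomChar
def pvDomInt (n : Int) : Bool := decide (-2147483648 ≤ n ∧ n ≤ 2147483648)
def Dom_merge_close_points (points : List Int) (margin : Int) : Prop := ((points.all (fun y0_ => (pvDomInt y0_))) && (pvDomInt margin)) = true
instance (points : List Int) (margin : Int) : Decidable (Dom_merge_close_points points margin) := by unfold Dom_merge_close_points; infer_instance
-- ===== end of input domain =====

-- B labels each sorted point with a cluster id (prefix sum of big-gap indicators) and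
-- then scatters the points into preallocated buckets indexed by id, instead of A's
-- single conditional-append pass; same results, alternative structure (no speed claim).

-- ===== PORT A =====
-- one iteration of A's for-loop body over the running `clusters` list
def pyStepA (margin : Int) (clusters : List (List Int)) (p : Int) : List (List Int) :=
  match clusters.getLast? with
  | none => clusters ++ [[p]]                         -- `not clusters` branch
  | some c =>
      if margin < |p - c.getLastD 0| then             -- abs(p - clusters[-1][-1]) > margin (last cluster never empty)
        clusters ++ [[p]]
      else
        clusters.dropLast ++ [c ++ [p]]               -- clusters[-1].append(p)

def merge_close_points (points : List Int) (margin : Int) : List (List Int) :=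
  (PySem.List.sorted points (fun x => x) false).foldl (pyStepA margin) []

-- ===== PORT B =====
def merge_close_points_alt (points : List Int) (margin : Int) : List (List Int) :=
  let pts := PySem.List.sorted points (fun x => x) false
  if pts.isEmpty then [] else
  -- labels = [0]; for prev, cur in zip(pts, pts[1:]): labels.append(labels[-1] + indicator)
  let labels := (pts.zip (pts.drop 1)).foldl
      (fun labels pc =>
        labels ++ [labels.getLastD 0 + (if margin < pc.2 - pc.1 then 1 else 0)]) [0]
  -- out = [[] for _ in range(labels[-1] + 1)]
  let out := (PySem.List.pyRange 0 (labels.getLastD 0 + 1) 1).map (fun _ => ([] : List Int))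
  -- for p, lab in zip(pts, labels): out[lab].append(p)   (lab always in range and ≥ 0)
  (pts.zip labels).foldl (fun out pl => out.modify pl.2.toNat (· ++ [pl.1])) out

-- ===== PRECONDITION & SPEC =====
def Spec_merge_close_points (points : List Int) (margin : Int) (out : List (List Int)) : Prop := out = merge_close_points_alt points margin
instance (points : List Int) (margin : Int) (out : List (List Int)) : Decidable (Spec_merge_close_points points margin out) := by unfold Spec_merge_close_points; infer_instance

-- ===== CLAIM (what is proved, stated in full; the proofs are below) =====
def Claim_equal_merge_close_points : Prop := ∀ (points : List Int) (margin : Int), Dom_merge_close_points points margin → Spec_merge_close_points points margin (merge_close_points points margin)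

-- ===== LEMMAS AND PROOFS =====

-- canonical recursive clustering, the bridge between the two ports
def splitRun (margin : Int) (last : Int) : List Int → List Int × List Int
  | [] => ([], [])
  | p :: rest =>
      if p - last ≤ margin then
        let pr := splitRun margin p rest
        (p :: pr.1, pr.2)
      else ([], p :: rest)

theorem splitRun_snd_length (margin : Int) : ∀ (l : List Int) (last : Int),
    (splitRun margin last l).2.length ≤ l.length
  | [], _ => by simp [splitRun]
  | p :: rest, last => by
      simp only [splitRun]
      split
      · exact Nat.le_succ_of_le (splitRun_snd_length margin rest p)
      · simp

def clustersOf (margin : Int) : List Int → List (List Int)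
  | [] => []
  | p :: rest =>
      let pr := splitRun margin p rest
      (p :: pr.1) :: clustersOf margin pr.2
termination_by l => l.length
decreasing_by
  exact Nat.lt_succ_of_le (splitRun_snd_length margin rest p)

-- ---------- A side: the fold equals clustersOf on a sorted list ----------

-- intermediate form of A's loop: current (nonempty) cluster kept separately, with its last element
def goA (m : Int) (cur : List Int) (last : Int) : List Int → List (List Int)
  | [] => [cur]
  | p :: l => if m < |p - last| then cur :: goA m [p] p l else goA m (cur ++ [p]) p l

theorem foldlA_eq_goA (m : Int) : ∀ (l : List Int) (acc : List (List Int)) (cur : List Int),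
    l.foldl (pyStepA m) (acc ++ [cur]) = acc ++ goA m cur (cur.getLastD 0) l
  | [], acc, cur => by simp [goA]
  | p :: l, acc, cur => by
      simp only [List.foldl_cons, goA]
      have hlast : (acc ++ [cur]).getLast? = some cur := by
        simp [List.getLast?_append]
      split
      · rename_i h
        rw [List.getLastD_eq_getLast?] at h
        rw [show pyStepA m (acc ++ [cur]) p = (acc ++ [cur]) ++ [[p]] by
              simp [pyStepA, hlast, h]]
        rw [foldlA_eq_goA m l (acc ++ [cur]) [p]]
        simp
      · rename_i h
        rw [List.getLastD_eq_getLast?] at h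
        rw [show pyStepA m (acc ++ [cur]) p = acc ++ [cur ++ [p]] by
              simp [pyStepA, hlast, h]]
        rw [foldlA_eq_goA m l acc (cur ++ [p])]
        simp

theorem goA_eq_clusters (m : Int) : ∀ (l : List Int) (last : Int),
    List.IsChain (· ≤ ·) (last :: l) → ∀ (cur : List Int),
    goA m cur last l = (cur ++ (splitRun m last l).1) :: clustersOf m (splitRun m last l).2
  | [], _, _, cur => by simp [goA, splitRun, clustersOf]
  | p :: l, last, hch, cur => by
      rcases List.isChain_cons_cons.mp hch with ⟨hle, hch'⟩
      have habs : |p - last| = p - last := abs_of_nonneg (by omega)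
      by_cases h : m < |p - last|
      · have hgt : ¬ (p - last ≤ m) := by omega
        simp only [goA, if_pos h, splitRun, if_neg hgt]
        rw [goA_eq_clusters m l p hch' [p]]
        simp [clustersOf]
      · have hle' : p - last ≤ m := by omega
        simp only [goA, if_neg h, splitRun, if_pos hle']
        rw [goA_eq_clusters m l p hch' (cur ++ [p])]
        simp

-- ---------- B side helpers: canonical labels and the scatter pass ----------

-- the groups concatenate back to the input list
theorem splitRun_flatten (m : Int) : ∀ (l : List Int) (last : Int),
    (splitRun m last l).1 ++ (splitRun m last l).2 = l
  | [], _ => by simp [splitRun]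
  | p :: rest, last => by
      simp only [splitRun]
      split
      · simpa using splitRun_flatten m rest p
      · simp

theorem clustersOf_flatten (m : Int) : ∀ (l : List Int), (clustersOf m l).flatten = l
  | [] => by simp [clustersOf]
  | p :: rest => by
      simp only [clustersOf, List.flatten_cons]
      rw [clustersOf_flatten m (splitRun m p rest).2]
      simp [splitRun_flatten m rest p]
termination_by l => l.length
decreasing_by exact Nat.lt_succ_of_le (splitRun_snd_length m rest p)

-- canonical label list: k for the first group, k+1 for the next, …
def labelList (k : Int) : List (List Int) → List Int
  | [] => []
  | g :: C => g.map (fun _ => k) ++ labelList (k + 1) C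

-- recursive form of B's label loop
def labGo (m : Int) (k : Int) (prev : Int) : List Int → List Int
  | [] => []
  | c :: l =>
      let k' := k + (if m < c - prev then 1 else 0)
      k' :: labGo m k' c l

theorem foldlLab_eq_labGo (m : Int) : ∀ (l : List Int) (p : Int) (acc : List Int) (k : Int),
    ((p :: l).zip l).foldl
      (fun labels pc => labels ++ [labels.getLastD 0 + (if m < pc.2 - pc.1 then 1 else 0)])
      (acc ++ [k]) = acc ++ k :: labGo m k p l
  | [], _, acc, k => by simp [labGo]
  | c :: l, p, acc, k => by
      simp only [List.zip_cons_cons, List.foldl_cons, labGo]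
      rw [show (acc ++ [k]).getLastD 0 = k by simp]
      rw [show acc ++ [k] ++ [k + (if m < c - p then 1 else 0)]
            = (acc ++ [k]) ++ [k + (if m < c - p then 1 else 0)] by simp]
      rw [foldlLab_eq_labGo m l c (acc ++ [k]) (k + (if m < c - p then 1 else 0))]
      simp

theorem labGo_eq_labelList (m : Int) : ∀ (l : List Int) (last k : Int),
    labGo m k last l =
      (splitRun m last l).1.map (fun _ => k)
        ++ labelList (k + 1) (clustersOf m (splitRun m last l).2)
  | [], _, _ => by simp [labGo, splitRun, clustersOf, labelList]
  | p :: l, last, k => by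
      simp only [labGo, splitRun]
      by_cases h : p - last ≤ m
      · have hn : ¬ m < p - last := by omega
        rw [if_pos h]
        simp only [if_neg hn, add_zero]
        rw [labGo_eq_labelList m l p k]
        simp
      · have hy : m < p - last := by omega
        rw [if_neg h]
        simp only [if_pos hy]
        have : clustersOf m (p :: l) =
            (p :: (splitRun m p l).1) :: clustersOf m (splitRun m p l).2 := by
          simp [clustersOf]
        rw [labGo_eq_labelList m l p (k + 1)]
        simp [this, labelList]

-- last label = number of clusters minus one
theorem mapConst_getLastD {k d : Int} : ∀ (g : List Int), g ≠ [] →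
    (g.map (fun _ => k)).getLastD d = k
  | [], h => absurd rfl h
  | [a], _ => rfl
  | a :: b :: g, _ => by
      rw [show (a :: b :: g).map (fun _ => k) = k :: (b :: g).map (fun _ => k) from rfl]
      rw [List.getLastD_cons]
      exact mapConst_getLastD (b :: g) (by simp)

theorem getLastD_append_right {α : Type} (l1 l2 : List α) (d : α) (h : l2 ≠ []) :
    (l1 ++ l2).getLastD d = l2.getLastD d := by
  cases hL : l2.getLast? with
  | none => exact absurd (List.getLast?_eq_none_iff.mp hL) h
  | some v => simp [List.getLastD_eq_getLast?, List.getLast?_append, hL]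

theorem labelList_ne_nil : ∀ (C : List (List Int)) (k : Int),
    (∀ g ∈ C, g ≠ []) → C ≠ [] → labelList k C ≠ []
  | [], _, _, hne => absurd rfl hne
  | g :: C, k, hne, _ => by
      have hg : g ≠ [] := hne g (by simp)
      cases g with
      | nil => exact absurd rfl hg
      | cons a gs => simp [labelList]

theorem labelList_getLastD : ∀ (C : List (List Int)) (k : Int) (d : Int),
    (∀ g ∈ C, g ≠ []) → C ≠ [] →
    (labelList k C).getLastD d = k + C.length - 1
  | [], _, _, _, hne => absurd rfl hne
  | g :: C, k, d, hne, _ => by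
      have hg : g ≠ [] := hne g (by simp)
      simp only [labelList]
      cases hC : C with
      | nil =>
          simp only [labelList, List.append_nil]
          rw [mapConst_getLastD g hg]
          simp
      | cons g' C' =>
          have hne' : ∀ x ∈ C, x ≠ [] := fun x hx => hne x (by simp [hx])
          have hLne : labelList (k + 1) C ≠ [] :=
            labelList_ne_nil C (k + 1) hne' (by simp [hC])
          rw [← hC, getLastD_append_right _ _ _ hLne,
            labelList_getLastD C (k + 1) d hne' (by simp [hC])]
          simp only [List.length_cons]
          push_cast
          ring

theorem clustersOf_ne_nil (m : Int) : ∀ (l : List Int), ∀ g ∈ clustersOf m l, g ≠ []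
  | [] => by simp [clustersOf]
  | p :: rest => by
      simp only [clustersOf, List.mem_cons]
      rintro g (rfl | hg)
      · simp
      · exact clustersOf_ne_nil m (splitRun m p rest).2 g hg
termination_by l => l.length
decreasing_by exact Nat.lt_succ_of_le (splitRun_snd_length m rest p)

-- labelled pairs of a cluster list, labels starting at k
def labeled (k : Nat) : List (List Int) → List (Int × Int)
  | [] => []
  | g :: C => g.map (fun p => (p, (k : Int))) ++ labeled (k + 1) C

theorem labelList_length : ∀ (C : List (List Int)) (k : Int),
    (labelList k C).length = C.flatten.length
  | [], _ => by simp [labelList]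
  | g :: C, k => by simp [labelList, labelList_length C (k + 1)]

theorem zip_mapConst : ∀ (g : List Int) (k : Nat),
    g.zip (g.map (fun _ => (k : Int))) = g.map (fun p => (p, (k : Int)))
  | [], _ => rfl
  | a :: g, k => by
      rw [List.map_cons, List.zip_cons_cons, zip_mapConst g k, List.map_cons]

theorem zip_flatten_labelList : ∀ (C : List (List Int)) (k : Nat),
    C.flatten.zip (labelList (k : Int) C) = labeled k C
  | [], _ => by simp [labelList, labeled]
  | g :: C, k => by
      simp only [List.flatten_cons, labelList, labeled]
      rw [List.zip_append (by simp)]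
      have hcast : ((k : Int) + 1) = (((k + 1 : Nat)) : Int) := by push_cast; ring
      rw [hcast, zip_flatten_labelList C (k + 1)]
      congr 1
      exact zip_mapConst g k

theorem modify_id' {α : Type} : ∀ (l : List α) (i : Nat), l.modify i (fun x => x) = l
  | [], i => by simp only [List.modify]; cases i <;> rfl
  | a :: l, 0 => by simp [List.modify]
  | a :: l, i + 1 => by
      simp only [List.modify, List.modifyTailIdx_succ_cons]
      have ih := modify_id' l i
      simp only [List.modify] at ih
      rw [ih]

theorem modify_append_cons {α : Type} : ∀ (pre : List α) (y : α) (t : List α) (f : α → α),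
    (pre ++ y :: t).modify pre.length f = pre ++ f y :: t
  | [], y, t, f => by simp [List.modify]
  | a :: pre, y, t, f => by
      simp only [List.cons_append, List.length_cons, List.modify,
        List.modifyTailIdx_succ_cons]
      have ih := modify_append_cons pre y t f
      simp only [List.modify] at ih
      rw [ih]

theorem modify_modify_same {α : Type} : ∀ (l : List α) (i : Nat) (f g : α → α),
    (l.modify i f).modify i g = l.modify i (fun x => g (f x))
  | [], i, _, _ => by
      simp only [List.modify]
      cases i <;> rfl
  | a :: l, 0, f, g => by simp [List.modify]
  | a :: l, i + 1, f, g => by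
      simp only [List.modify, List.modifyTailIdx_succ_cons]
      have ih := modify_modify_same l i f g
      simp only [List.modify] at ih
      rw [ih]

-- scattering one group's pairs appends the whole group to bucket k
theorem scatter_group (k : Nat) : ∀ (g : List Int) (out : List (List Int)),
    (g.map (fun p => (p, (k : Int)))).foldl
      (fun out pl => out.modify pl.2.toNat (· ++ [pl.1])) out
      = out.modify k (· ++ g)
  | [], out => by simp [modify_id']
  | p :: g, out => by
      simp only [List.map_cons, List.foldl_cons, Int.toNat_natCast]
      rw [scatter_group k g (out.modify k (· ++ [p]))]
      rw [modify_modify_same]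
      simp

theorem scatter_labeled : ∀ (C : List (List Int)) (pre : List (List Int)),
    (labeled pre.length C).foldl
      (fun out pl => out.modify pl.2.toNat (· ++ [pl.1]))
      (pre ++ C.map (fun _ => [])) = pre ++ C
  | [], pre => by simp [labeled]
  | g :: C, pre => by
      simp only [labeled, List.map_cons, List.foldl_append]
      rw [scatter_group pre.length g (pre ++ [] :: C.map (fun _ => []))]
      rw [modify_append_cons pre [] (C.map (fun _ => [])) (· ++ g)]
      simp only [List.nil_append]
      have := scatter_labeled C (pre ++ [g])
      simp only [List.length_append, List.length_cons, List.length_nil,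
        List.append_assoc, List.cons_append, List.nil_append] at this ⊢
      simpa using this

-- ===== VERDICT (by name: the statement is the Claim_ definition above) =====
theorem merge_close_points_spec : Claim_equal_merge_close_points := by
  intro points margin _
  unfold Spec_merge_close_points merge_close_points merge_close_points_alt
  have hpw : (PySem.List.sorted points (fun x => x) false).Pairwise (· ≤ ·) := by
    simpa using PySem.List.sorted_pairwise (xs := points) (key := fun x => x)
  cases hs : PySem.List.sorted points (fun x => x) false with
  | nil => simp
  | cons x xs =>
      rw [hs] at hpw
      have hch : List.IsChain (· ≤ ·) (x :: xs) :=
        List.isChain_iff_pairwise.mpr hpw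
      -- A side
      have h1 : pyStepA margin [] x = [] ++ [[x]] := by simp [pyStepA]
      rw [List.foldl_cons, h1, foldlA_eq_goA margin xs [] [x]]
      rw [show ([x] : List Int).getLastD 0 = x from rfl]
      simp only [List.nil_append]
      rw [goA_eq_clusters margin xs x hch [x]]
      set C := clustersOf margin (x :: xs) with hC
      have hCdef : C = (x :: (splitRun margin x xs).1) :: clustersOf margin (splitRun margin x xs).2 := by
        simp [hC, clustersOf]
      -- B side
      simp only [List.isEmpty_cons, Bool.false_eq_true, if_false, List.drop_one, List.tail_cons]
      rw [show ([0] : List Int) = [] ++ [0] by simp,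
        foldlLab_eq_labGo margin xs x [] 0, List.nil_append]
      have hlab : (0 : Int) :: labGo margin 0 x xs = labelList 0 C := by
        rw [labGo_eq_labelList margin xs x 0, hCdef]
        simp [labelList]
      rw [hlab]
      have hne : ∀ g ∈ C, g ≠ [] := clustersOf_ne_nil margin (x :: xs)
      have hCne : C ≠ [] := by rw [hCdef]; simp
      have hlast : (labelList 0 C).getLastD 0 = 0 + C.length - 1 :=
        labelList_getLastD C 0 0 hne hCne
      rw [hlast]
      have hbuckets : PySem.List.pyRange 0 (0 + (C.length : Int) - 1 + 1) 1
          = PySem.List.pyRange 0 (C.length : Int) 1 := by norm_num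
      rw [hbuckets]
      have hmapbuckets : (PySem.List.pyRange 0 (C.length : Int) 1).map (fun _ => ([] : List Int))
          = C.map (fun _ => []) := by
        have hlen : (PySem.List.pyRange 0 (C.length : Int) 1).length = C.length := by
          simp [PySem.List.length_pyRange_one]
        clear_value C
        rw [List.map_eq_replicate_iff.mpr (by intro b hb; rfl),
          List.map_eq_replicate_iff.mpr (by intro b hb; rfl), hlen]
      rw [hmapbuckets]
      have hflat : (x :: xs) = C.flatten := (clustersOf_flatten margin (x :: xs)).symm
      have hz := zip_flatten_labelList C 0
      norm_num at hz
      rw [hflat, hz]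
      have hsc := scatter_labeled C []
      simp only [List.length_nil, List.nil_append] at hsc
      rw [hsc, hCdef]
      simp
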